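-- pv_equiv track=rewrite | github.com/mislavzanic/advent-of-code | 2021/src/d21.py | next_set
-- ===== SOURCE A (Python) =====
-- from collections import defaultdict, Counter
--
-- def next_set(p1,p2,i,wins):
--     c = Counter()
--     throws,outcome = [i+3 for i in range(0,7)],[1,3,6,7,6,3,1]
--     for k,v in p1.items():
--         if k[0] >= 21: continue
--         for (t,o) in zip(throws,outcome):
--             key = (k[1] + t) % 10 or 10
--             c[(key + k[0],key)] += o * v
--
--     wins[i % 2] += sum(v for k,v in c.items() if k[0] >= 21) * sum(v for k,v in p2.items() if k[0] < 21)
--     return c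
-- ===== SOURCE B (Python) =====
-- from collections import Counter
--
-- # Same return value as A; also performs the same in-place update of wins.
-- def next_set(p1, p2, i, wins):
--     # B derives the triple-roll transition by brute-force enumeration of the
--     # 27 equally likely (d1,d2,d3) triples per state (no precomputed
--     # multiplicity table), collects each state's contributions in a local
--     # counter, then merges it into c while tallying the winning weight inline.
--     c = Counter()
--     won = 0
--     for (s, p), v in p1.items():
--         if s >= 21:
--             continue
--         local = Counter()
--         for d1 in (1, 2, 3):
--             for d2 in (1, 2, 3):
--                 for d3 in (1, 2, 3):
--                     q = (p + d1 + d2 + d3) % 10 or 10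
--                     local[(s + q, q)] += v
--         for k, w in local.items():
--             c[k] += w
--             if k[0] >= 21:
--                 won += w
--     wins[i % 2] += won * sum(v for k, v in p2.items() if k[0] < 21)
--     return c
-- ===== Notes on version B (the rewrite author's own statement) =====
-- stated objective: alternative
-- what changed: B has no precomputed seven-outcome table [1,3,6,7,6,3,1]: it enumerates the 27 equally likely (d1,d2,d3) single-die triples per state into a per-state local counter, then merges that local counter into c while tallying the winning weight inline, replacing A's zip(throws,outcome) pass and post-hoc rescan of c.
import Mathlib
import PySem

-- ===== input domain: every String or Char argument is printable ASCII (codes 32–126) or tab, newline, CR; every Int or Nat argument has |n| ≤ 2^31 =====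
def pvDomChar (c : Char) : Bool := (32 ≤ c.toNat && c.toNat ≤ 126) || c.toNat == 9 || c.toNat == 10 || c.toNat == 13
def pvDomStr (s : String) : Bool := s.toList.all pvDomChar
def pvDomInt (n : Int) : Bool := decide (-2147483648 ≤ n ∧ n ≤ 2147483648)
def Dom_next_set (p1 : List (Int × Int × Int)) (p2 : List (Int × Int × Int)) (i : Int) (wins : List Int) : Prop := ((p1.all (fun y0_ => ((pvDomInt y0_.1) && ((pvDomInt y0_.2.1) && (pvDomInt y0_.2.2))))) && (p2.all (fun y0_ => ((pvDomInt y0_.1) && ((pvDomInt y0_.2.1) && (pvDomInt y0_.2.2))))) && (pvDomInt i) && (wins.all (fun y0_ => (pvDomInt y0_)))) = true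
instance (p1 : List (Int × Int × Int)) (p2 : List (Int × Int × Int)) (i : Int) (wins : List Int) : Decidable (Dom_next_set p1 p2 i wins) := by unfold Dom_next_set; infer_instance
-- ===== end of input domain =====

-- B replaces A's precomputed seven-outcome multiplicity table + post-hoc rescan of c by a
-- brute-force enumeration of the 27 equally likely single-die triples into a per-state local
-- counter, merged into c with an inline win tally. Both A and B also mutate wins[i % 2] in
-- place identically (a side effect not part of the return value); the equivalence proved here
-- is about the returned counter only.

-- Counter update c[(a,b)] += d : add to an existing entry in place, else append (missing = 0)
def pvCAdd (c : List (Int × Int × Int)) (a b d : Int) : List (Int × Int × Int) :=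
  match c with
  | [] => [(a, b, d)]
  | e :: rest =>
      if e.1 = a ∧ e.2.1 = b then (e.1, e.2.1, e.2.2 + d) :: rest
      else e :: pvCAdd rest a b d

-- the expression '(p + t) % 10 or 10' appearing verbatim in both Pythons
def pvQ (p t : Int) : Int :=
  if PySem.Int.mod (p + t) 10 = 0 then 10 else PySem.Int.mod (p + t) 10

-- ===== PORT A =====
def pvThrows : List Int := (PySem.List.pyRange 0 7 1).map (fun j => j + 3)
def pvOutcome : List Int := [1, 3, 6, 7, 6, 3, 1]

-- A's inner 'for (t,o) in zip(throws, outcome)' loop, for one state kv = (s, p, v)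
def pvInnerA (kv : Int × Int × Int) (c : List (Int × Int × Int)) : List (Int × Int × Int) :=
  (pvThrows.zip pvOutcome).foldl
    (fun c tO => pvCAdd c (pvQ kv.2.1 tO.1 + kv.1) (pvQ kv.2.1 tO.1) (tO.2 * kv.2.2))
    c

def next_set (p1 : List (Int × Int × Int)) (p2 : List (Int × Int × Int)) (i : Int) (wins : List Int) : List (Int × Int × Int) :=
  -- the final line 'wins[i % 2] += …' only mutates the argument wins (Pre_ excludes its IndexError)
  p1.foldl (fun c kv => if kv.1 ≥ 21 then c else pvInnerA kv c) ([] : List (Int × Int × Int))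

-- ===== PORT B =====
-- B's per-state local counter: the 27 (d1,d2,d3) single-die triples, weight v each
def pvLocal (s p v : Int) : List (Int × Int × Int) :=
  ([1, 2, 3] : List Int).foldl (fun l d1 =>
    ([1, 2, 3] : List Int).foldl (fun l d2 =>
      ([1, 2, 3] : List Int).foldl (fun l d3 =>
        pvCAdd l (s + pvQ p (d1 + d2 + d3)) (pvQ p (d1 + d2 + d3)) v) l) l) []

-- B's merge loop 'for k, w in local.items(): …', threading the state (c, won)
def pvInnerB (kv : Int × Int × Int) (st : List (Int × Int × Int) × Int) : List (Int × Int × Int) × Int :=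
  (pvLocal kv.1 kv.2.1 kv.2.2).foldl
    (fun st e =>
      (pvCAdd st.1 e.1 e.2.1 e.2.2,
       if e.1 ≥ 21 then st.2 + e.2.2 else st.2))
    st

def next_set_alt (p1 : List (Int × Int × Int)) (p2 : List (Int × Int × Int)) (i : Int) (wins : List Int) : List (Int × Int × Int) :=
  -- 'wins[i % 2] += won * …' only mutates the argument wins; the return value is the counter
  (p1.foldl (fun st kv => if kv.1 ≥ 21 then st else pvInnerB kv st)
    (([] : List (Int × Int × Int)), (0 : Int))).1

-- ===== PRECONDITION & SPEC =====
-- Pre_ excludes exactly the inputs where the statement 'wins[i % 2] += …' raises IndexError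
-- (i % 2 ≥ len(wins)); both A and B raise there.
def Pre_next_set (p1 : List (Int × Int × Int)) (p2 : List (Int × Int × Int)) (i : Int) (wins : List Int) : Prop :=
  PySem.Int.mod i 2 < (wins.length : Int)
instance (p1 : List (Int × Int × Int)) (p2 : List (Int × Int × Int)) (i : Int) (wins : List Int) : Decidable (Pre_next_set p1 p2 i wins) := by unfold Pre_next_set; infer_instance

def pvWitness_next_set : (List (Int × Int × Int)) × (List (Int × Int × Int)) × Int × List Int :=
  ([(0, 4, 1)], [(0, 8, 1)], 0, [0, 0])

def Spec_next_set (p1 : List (Int × Int × Int)) (p2 : List (Int × Int × Int)) (i : Int) (wins : List Int) (out : List (Int × Int × Int)) : Prop := out = next_set_alt p1 p2 i wins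
instance (p1 : List (Int × Int × Int)) (p2 : List (Int × Int × Int)) (i : Int) (wins : List Int) (out : List (Int × Int × Int)) : Decidable (Spec_next_set p1 p2 i wins out) := by unfold Spec_next_set; infer_instance

-- ===== CLAIM (what is proved, stated in full; the proofs are below) =====
def Claim_equal_next_set : Prop := ∀ (p1 : List (Int × Int × Int)) (p2 : List (Int × Int × Int)) (i : Int) (wins : List Int), Dom_next_set p1 p2 i wins → Pre_next_set p1 p2 i wins → Spec_next_set p1 p2 i wins (next_set p1 p2 i wins)

-- ===== LEMMAS AND PROOFS =====

-- the concrete list zip(throws, outcome)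
def pvL7 : List (Int × Int) := [(3, 1), (4, 3), (5, 6), (6, 7), (7, 6), (8, 3), (9, 1)]

theorem pvZipA : pvThrows.zip pvOutcome = pvL7 := by decide

-- pvQ p · is injective on throw totals 3..9 (residues differ by less than 10)
theorem pvQ_inj (p t u : Int) (h1 : 0 < u - t) (h2 : u - t < 10) : pvQ p t ≠ pvQ p u := by
  unfold pvQ
  simp only [PySem.Int.mod_eq_emod_of_pos (show (0:Int) < 10 by norm_num)]
  have hm1 : 0 ≤ (p + t) % 10 ∧ (p + t) % 10 < 10 := ⟨Int.emod_nonneg _ (by norm_num), Int.emod_lt_of_pos _ (by norm_num)⟩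
  have hm2 : 0 ≤ (p + u) % 10 ∧ (p + u) % 10 < 10 := ⟨Int.emod_nonneg _ (by norm_num), Int.emod_lt_of_pos _ (by norm_num)⟩
  have hne : (p + t) % 10 ≠ (p + u) % 10 := by omega
  split_ifs <;> omega

-- a fold whose first component is updated independently of the second projects to a fold
theorem pvFoldFst {α β γ : Type} (f : α → β → α) (g : α × γ → β → γ) :
    ∀ (L : List β) (c : α) (w : γ),
      (L.foldl (fun st e => (f st.1 e, g st e)) (c, w)).1 = L.foldl f c := by
  intro L
  induction L with
  | nil => intro c w; rfl
  | cons e tl ih => intro c w; simpa using ih (f c e) _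

-- the 27-triple enumeration collapses to the seven distinct landing keys with the
-- binomial multiplicities 1,3,6,7,6,3,1
theorem pvLocalEq (s p v : Int) :
    pvLocal s p v
      = pvL7.map (fun tO => (s + pvQ p tO.1, pvQ p tO.1, tO.2 * v)) := by
  have h34 := pvQ_inj p 3 4 (by norm_num) (by norm_num)
  have h35 := pvQ_inj p 3 5 (by norm_num) (by norm_num)
  have h36 := pvQ_inj p 3 6 (by norm_num) (by norm_num)
  have h37 := pvQ_inj p 3 7 (by norm_num) (by norm_num)
  have h38 := pvQ_inj p 3 8 (by norm_num) (by norm_num)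
  have h39 := pvQ_inj p 3 9 (by norm_num) (by norm_num)
  have h45 := pvQ_inj p 4 5 (by norm_num) (by norm_num)
  have h46 := pvQ_inj p 4 6 (by norm_num) (by norm_num)
  have h47 := pvQ_inj p 4 7 (by norm_num) (by norm_num)
  have h48 := pvQ_inj p 4 8 (by norm_num) (by norm_num)
  have h49 := pvQ_inj p 4 9 (by norm_num) (by norm_num)
  have h56 := pvQ_inj p 5 6 (by norm_num) (by norm_num)
  have h57 := pvQ_inj p 5 7 (by norm_num) (by norm_num)
  have h58 := pvQ_inj p 5 8 (by norm_num) (by norm_num)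
  have h59 := pvQ_inj p 5 9 (by norm_num) (by norm_num)
  have h67 := pvQ_inj p 6 7 (by norm_num) (by norm_num)
  have h68 := pvQ_inj p 6 8 (by norm_num) (by norm_num)
  have h69 := pvQ_inj p 6 9 (by norm_num) (by norm_num)
  have h78 := pvQ_inj p 7 8 (by norm_num) (by norm_num)
  have h79 := pvQ_inj p 7 9 (by norm_num) (by norm_num)
  have h89 := pvQ_inj p 8 9 (by norm_num) (by norm_num)
  simp only [pvLocal, pvL7, List.foldl_cons, List.foldl_nil, List.map]
  norm_num [pvCAdd, h34, h35, h36, h37, h38, h39, h45, h46, h47, h48, h49,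
    h56, h57, h58, h59, h67, h68, h69, h78, h79, h89,
    h34.symm, h35.symm, h36.symm, h37.symm, h38.symm, h39.symm, h45.symm, h46.symm,
    h47.symm, h48.symm, h49.symm, h56.symm, h57.symm, h58.symm, h59.symm, h67.symm,
    h68.symm, h69.symm, h78.symm, h79.symm, h89.symm]
  ring_nf
  simp

-- per-state agreement of B's local-counter merge with A's inner loop
theorem pvInnerEq (kv : Int × Int × Int) (st : List (Int × Int × Int) × Int) :
    (pvInnerB kv st).1 = pvInnerA kv st.1 := by
  obtain ⟨c, w⟩ := st
  unfold pvInnerB pvInnerA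
  rw [pvZipA, pvLocalEq]
  rw [pvFoldFst (fun (c : List (Int × Int × Int)) (e : Int × Int × Int) => pvCAdd c e.1 e.2.1 e.2.2)
    (fun (st : List (Int × Int × Int) × Int) (e : Int × Int × Int) => if e.1 ≥ 21 then st.2 + e.2.2 else st.2)]
  rw [List.foldl_map]
  simp only [pvL7, List.foldl_cons, List.foldl_nil]
  ring_nf

theorem pvOuterEq (l : List (Int × Int × Int)) :
    ∀ (c : List (Int × Int × Int)) (w : Int),
      (l.foldl (fun st kv => if kv.1 ≥ 21 then st else pvInnerB kv st) (c, w)).1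
        = l.foldl (fun c kv => if kv.1 ≥ 21 then c else pvInnerA kv c) c := by
  induction l with
  | nil => intro c w; rfl
  | cons kv tl ih =>
      intro c w
      simp only [List.foldl_cons]
      by_cases h : kv.1 ≥ 21
      · rw [if_pos h, if_pos h]; exact ih c w
      · rw [if_neg h, if_neg h]
        have h2 := ih (pvInnerB kv (c, w)).1 (pvInnerB kv (c, w)).2
        rw [Prod.mk.eta] at h2
        rw [h2, pvInnerEq]

-- ===== VERDICT (by name: the statement is the Claim_ definition above) =====
theorem next_set_spec : Claim_equal_next_set := by
  intro p1 p2 i wins _ _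
  unfold Spec_next_set next_set next_set_alt
  exact (pvOuterEq p1 [] 0).symm
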